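-- pv_equiv track=rewrite | github.com/KKDad/ComicCacher | utils/migrate-comics-json.py | find_source_info
-- ===== SOURCE A (Python) =====
-- from typing import Dict, Any, Tuple, Optional
--
-- GOCOMICS_MAPPING = {
--     "Adam At Home": "adamathome",
--     "Agnes": "agnes",
--     "AndyCap": "andycapp",
--     "BC": "bc",
--     "CalvinAndHobbes": "calvinandhobbes",
--     "Cathy": "cathy",
--     "CitizenDog": "citizendog",
--     "Committed": "committed",
--     "Doonesbury": "doonesbury",
--     "Drabble": "drabble",
--     "ForBetterorForWorse": "forbetterorforworse",
--     "FoxTrot": "foxtrot",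
--     "Frank-And-Ernest": "frank-and-ernest",
--     "Garfield": "garfield",
--     "GetFuzzy": "getfuzzy",
--     "Herman": "herman",
--     "Luann": "luann",
--     "NonSequitur": "nonsequitur",
--     "Overboard": "overboard",
--     "OvertheHedge": "overthehedge",
--     "PCandPixel": "pcandpixel",
--     "Peanuts": "peanuts",
--     "PearlsBeforeSwine": "pearlsbeforeswine",
--     "Pickles": "pickles",
--     "RealityCheck": "realitycheck",
--     "RoseisRose": "roseisrose",
--     "ScaryGary": "scarygary",
--     "Shoe": "shoe",
--     "TheBoondocks": "boondocks",
--     "TheBornLoser": "the-born-loser",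
--     "TheDuplex": "theduplex",
--     "TheGrizzWells": "thegrizzwells",
--     "WizardOfId": "wizardofid",
--     "WorkingDaze": "working-daze",
--     "Ziggy": "ziggy"
-- }
--
-- COMICSKINGDOM_MAPPING = {
--     "Baby Blues": "baby-blues",
--     "Beetle Bailey": "beetle-bailey-1",
--     "Dustin": "dustin",
--     "Hagar": "hagar-the-horrible",
--     "Mother Goose & Grimm": "mother-goose-grimm",
--     "Sherman's Lagoon": "sherman-s-lagoon",
--     "Zits": "zits"
-- }
--
-- def normalize_comic_name(name: str) -> str:
--     """Normalize comic name for matching (remove spaces, make lowercase)"""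
--     return name.replace(" ", "").replace("&", "").lower()
--
-- def find_source_info(comic_name: str) -> Optional[Tuple[str, str]]:
--     """
--     Find the source and sourceIdentifier for a comic name.
--
--     Returns:
--         Tuple of (source, sourceIdentifier) or None if not found
--     """
--     # Normalize the input name
--     normalized = normalize_comic_name(comic_name)
--
--     # Check GoComics
--     for key, value in GOCOMICS_MAPPING.items():
--         if normalize_comic_name(key) == normalized:
--             return ("gocomics", value)
--
--     # Check Comics Kingdom
--     for key, value in COMICSKINGDOM_MAPPING.items():
--         if normalize_comic_name(key) == normalized:
--             return ("comicskingdom", value)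
--
--     return None
-- ===== SOURCE B (Python) =====
-- from typing import Optional, Tuple
--
-- # Precomputed lookup table: normalized comic name -> (source, sourceIdentifier).
-- # Normalized keys of the two original mappings are all distinct, so a single
-- # flat table with one dict lookup reproduces the sequential-scan semantics.
-- _SOURCE_INFO = {
--     'adamathome': ('gocomics', 'adamathome'),
--     'agnes': ('gocomics', 'agnes'),
--     'andycap': ('gocomics', 'andycapp'),
--     'bc': ('gocomics', 'bc'),
--     'calvinandhobbes': ('gocomics', 'calvinandhobbes'),
--     'cathy': ('gocomics', 'cathy'),
--     'citizendog': ('gocomics', 'citizendog'),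
--     'committed': ('gocomics', 'committed'),
--     'doonesbury': ('gocomics', 'doonesbury'),
--     'drabble': ('gocomics', 'drabble'),
--     'forbetterorforworse': ('gocomics', 'forbetterorforworse'),
--     'foxtrot': ('gocomics', 'foxtrot'),
--     'frank-and-ernest': ('gocomics', 'frank-and-ernest'),
--     'garfield': ('gocomics', 'garfield'),
--     'getfuzzy': ('gocomics', 'getfuzzy'),
--     'herman': ('gocomics', 'herman'),
--     'luann': ('gocomics', 'luann'),
--     'nonsequitur': ('gocomics', 'nonsequitur'),
--     'overboard': ('gocomics', 'overboard'),
--     'overthehedge': ('gocomics', 'overthehedge'),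
--     'pcandpixel': ('gocomics', 'pcandpixel'),
--     'peanuts': ('gocomics', 'peanuts'),
--     'pearlsbeforeswine': ('gocomics', 'pearlsbeforeswine'),
--     'pickles': ('gocomics', 'pickles'),
--     'realitycheck': ('gocomics', 'realitycheck'),
--     'roseisrose': ('gocomics', 'roseisrose'),
--     'scarygary': ('gocomics', 'scarygary'),
--     'shoe': ('gocomics', 'shoe'),
--     'theboondocks': ('gocomics', 'boondocks'),
--     'thebornloser': ('gocomics', 'the-born-loser'),
--     'theduplex': ('gocomics', 'theduplex'),
--     'thegrizzwells': ('gocomics', 'thegrizzwells'),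
--     'wizardofid': ('gocomics', 'wizardofid'),
--     'workingdaze': ('gocomics', 'working-daze'),
--     'ziggy': ('gocomics', 'ziggy'),
--     'babyblues': ('comicskingdom', 'baby-blues'),
--     'beetlebailey': ('comicskingdom', 'beetle-bailey-1'),
--     'dustin': ('comicskingdom', 'dustin'),
--     'hagar': ('comicskingdom', 'hagar-the-horrible'),
--     'mothergoosegrimm': ('comicskingdom', 'mother-goose-grimm'),
--     "sherman'slagoon": ('comicskingdom', 'sherman-s-lagoon'),
--     'zits': ('comicskingdom', 'zits'),
-- }
--
-- def find_source_info(comic_name: str) -> Optional[Tuple[str, str]]: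
--     """Find the source and sourceIdentifier for a comic name."""
--     return _SOURCE_INFO.get(comic_name.replace(" ", "").replace("&", "").lower())
-- ===== Notes on version B (the rewrite author's own statement) =====
-- stated objective: idiomatic
-- what changed: Replaces the two per-call linear scans that re-normalize every mapping key with a single precomputed flat table keyed by already-normalized names (all 42 normalized keys are distinct, so one dict lookup reproduces the first-match scan order); the function body becomes one normalize plus one dict .get.
import Mathlib
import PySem

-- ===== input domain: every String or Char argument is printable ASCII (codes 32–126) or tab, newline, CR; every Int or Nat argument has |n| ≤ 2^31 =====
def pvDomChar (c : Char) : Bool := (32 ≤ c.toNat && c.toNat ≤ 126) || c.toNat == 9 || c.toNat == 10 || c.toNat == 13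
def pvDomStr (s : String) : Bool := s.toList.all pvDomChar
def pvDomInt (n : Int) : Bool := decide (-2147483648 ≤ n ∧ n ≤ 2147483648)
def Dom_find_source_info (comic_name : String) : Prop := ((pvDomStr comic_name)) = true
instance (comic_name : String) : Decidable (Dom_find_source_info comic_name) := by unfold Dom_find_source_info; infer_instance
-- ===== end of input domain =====

-- B replaces A's two per-call linear scans (which re-normalize every mapping key) with a
-- single precomputed flat table keyed by already-normalized names; one dict lookup per call.

-- ===== PORT A =====
def GOCOMICS_MAPPING : List (String × String) := [
  ("Adam At Home", "adamathome"), ("Agnes", "agnes"), ("AndyCap", "andycapp"),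
  ("BC", "bc"), ("CalvinAndHobbes", "calvinandhobbes"), ("Cathy", "cathy"),
  ("CitizenDog", "citizendog"), ("Committed", "committed"), ("Doonesbury", "doonesbury"),
  ("Drabble", "drabble"), ("ForBetterorForWorse", "forbetterorforworse"), ("FoxTrot", "foxtrot"),
  ("Frank-And-Ernest", "frank-and-ernest"), ("Garfield", "garfield"), ("GetFuzzy", "getfuzzy"),
  ("Herman", "herman"), ("Luann", "luann"), ("NonSequitur", "nonsequitur"),
  ("Overboard", "overboard"), ("OvertheHedge", "overthehedge"), ("PCandPixel", "pcandpixel"),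
  ("Peanuts", "peanuts"), ("PearlsBeforeSwine", "pearlsbeforeswine"), ("Pickles", "pickles"),
  ("RealityCheck", "realitycheck"), ("RoseisRose", "roseisrose"), ("ScaryGary", "scarygary"),
  ("Shoe", "shoe"), ("TheBoondocks", "boondocks"), ("TheBornLoser", "the-born-loser"),
  ("TheDuplex", "theduplex"), ("TheGrizzWells", "thegrizzwells"), ("WizardOfId", "wizardofid"),
  ("WorkingDaze", "working-daze"), ("Ziggy", "ziggy")]

def COMICSKINGDOM_MAPPING : List (String × String) := [
  ("Baby Blues", "baby-blues"), ("Beetle Bailey", "beetle-bailey-1"), ("Dustin", "dustin"),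
  ("Hagar", "hagar-the-horrible"), ("Mother Goose & Grimm", "mother-goose-grimm"),
  ("Sherman's Lagoon", "sherman-s-lagoon"), ("Zits", "zits")]

-- name.replace(" ", "").replace("&", "").lower()
def normalize_comic_name (name : String) : String :=
  PySem.Str.lower (PySem.Str.replace (PySem.Str.replace name " " "") "&" "")

-- the 'for key, value in MAPPING.items(): if normalize_comic_name(key) == normalized: return (src, value)' loop
def pvScanA (src : String) (normalized : String) : List (String × String) → Option (String × String)
  | [] => none
  | (key, value) :: rest =>
      if normalize_comic_name key == normalized then some (src, value)
      else pvScanA src normalized rest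

def find_source_info (comic_name : String) : Option (String × String) :=
  let normalized := normalize_comic_name comic_name
  match pvScanA "gocomics" normalized GOCOMICS_MAPPING with
  | some r => some r
  | none =>
    match pvScanA "comicskingdom" normalized COMICSKINGDOM_MAPPING with
    | some r => some r
    | none => none

-- ===== PORT B =====
-- Source B's module-level literal dict _SOURCE_INFO (all keys distinct, already normalized)
def pvSourceInfo : PySem.Dict String (String × String) := PySem.Dict.mk [
  ("adamathome", ("gocomics", "adamathome")),
  ("agnes", ("gocomics", "agnes")),
  ("andycap", ("gocomics", "andycapp")),
  ("bc", ("gocomics", "bc")),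
  ("calvinandhobbes", ("gocomics", "calvinandhobbes")),
  ("cathy", ("gocomics", "cathy")),
  ("citizendog", ("gocomics", "citizendog")),
  ("committed", ("gocomics", "committed")),
  ("doonesbury", ("gocomics", "doonesbury")),
  ("drabble", ("gocomics", "drabble")),
  ("forbetterorforworse", ("gocomics", "forbetterorforworse")),
  ("foxtrot", ("gocomics", "foxtrot")),
  ("frank-and-ernest", ("gocomics", "frank-and-ernest")),
  ("garfield", ("gocomics", "garfield")),
  ("getfuzzy", ("gocomics", "getfuzzy")),
  ("herman", ("gocomics", "herman")),
  ("luann", ("gocomics", "luann")),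
  ("nonsequitur", ("gocomics", "nonsequitur")),
  ("overboard", ("gocomics", "overboard")),
  ("overthehedge", ("gocomics", "overthehedge")),
  ("pcandpixel", ("gocomics", "pcandpixel")),
  ("peanuts", ("gocomics", "peanuts")),
  ("pearlsbeforeswine", ("gocomics", "pearlsbeforeswine")),
  ("pickles", ("gocomics", "pickles")),
  ("realitycheck", ("gocomics", "realitycheck")),
  ("roseisrose", ("gocomics", "roseisrose")),
  ("scarygary", ("gocomics", "scarygary")),
  ("shoe", ("gocomics", "shoe")),
  ("theboondocks", ("gocomics", "boondocks")),
  ("thebornloser", ("gocomics", "the-born-loser")),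
  ("theduplex", ("gocomics", "theduplex")),
  ("thegrizzwells", ("gocomics", "thegrizzwells")),
  ("wizardofid", ("gocomics", "wizardofid")),
  ("workingdaze", ("gocomics", "working-daze")),
  ("ziggy", ("gocomics", "ziggy")),
  ("babyblues", ("comicskingdom", "baby-blues")),
  ("beetlebailey", ("comicskingdom", "beetle-bailey-1")),
  ("dustin", ("comicskingdom", "dustin")),
  ("hagar", ("comicskingdom", "hagar-the-horrible")),
  ("mothergoosegrimm", ("comicskingdom", "mother-goose-grimm")),
  ("sherman'slagoon", ("comicskingdom", "sherman-s-lagoon")),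
  ("zits", ("comicskingdom", "zits"))]

-- _SOURCE_INFO.get(comic_name.replace(" ", "").replace("&", "").lower())
def find_source_info_alt (comic_name : String) : Option (String × String) :=
  pvSourceInfo.get?
    (PySem.Str.lower (PySem.Str.replace (PySem.Str.replace comic_name " " "") "&" ""))

-- ===== PRECONDITION & SPEC =====
def Spec_find_source_info (comic_name : String) (out : Option (String × String)) : Prop := out = find_source_info_alt comic_name
instance (comic_name : String) (out : Option (String × String)) : Decidable (Spec_find_source_info comic_name out) := by unfold Spec_find_source_info; infer_instance

-- ===== CLAIM (what is proved, stated in full; the proofs are below) =====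
def Claim_equal_find_source_info : Prop := ∀ (comic_name : String), Dom_find_source_info comic_name → Spec_find_source_info comic_name (find_source_info comic_name)

-- ===== LEMMAS AND PROOFS =====

-- A's first-match scan over a mapping equals a lookup in the literal dict whose keys
-- are that mapping's keys pre-normalized
theorem pvScanA_eq_get (src n : String) (l : List (String × String)) :
    pvScanA src n l
      = (PySem.Dict.mk (l.map (fun kv => (normalize_comic_name kv.1, (src, kv.2))))).get? n := by
  induction l with
  | nil => simp [pvScanA, PySem.Dict.get?]
  | cons kv rest ih =>
    obtain ⟨key, value⟩ := kv
    simp [pvScanA, PySem.Dict.get?_mk_cons, ih]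

-- lookup in a concatenated literal dict = first lookup, else second
theorem pvGet_mk_append (n : String) (l1 l2 : List (String × (String × String))) :
    (PySem.Dict.mk (l1 ++ l2)).get? n
      = ((PySem.Dict.mk l1).get? n).or ((PySem.Dict.mk l2).get? n) := by
  induction l1 with
  | nil => simp [PySem.Dict.get?]
  | cons kv rest ih =>
    obtain ⟨k, v⟩ := kv
    simp only [List.cons_append, PySem.Dict.get?_mk_cons, ih]
    by_cases h : (k == n) = true <;> simp [h]

-- the literal table is exactly the two mappings with normalized keys, GoComics first
theorem pvTable_eq :
    pvSourceInfo = PySem.Dict.mk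
      (GOCOMICS_MAPPING.map (fun kv => (normalize_comic_name kv.1, ("gocomics", kv.2)))
        ++ COMICSKINGDOM_MAPPING.map (fun kv => (normalize_comic_name kv.1, ("comicskingdom", kv.2)))) := by
  decide

-- ===== VERDICT (by name: the statement is the Claim_ definition above) =====
theorem find_source_info_spec : Claim_equal_find_source_info := by
  intro comic_name _
  unfold Spec_find_source_info find_source_info find_source_info_alt
  rw [pvTable_eq,
    show PySem.Str.lower (PySem.Str.replace (PySem.Str.replace comic_name " " "") "&" "")
      = normalize_comic_name comic_name from rfl]
  show (match pvScanA "gocomics" (normalize_comic_name comic_name) GOCOMICS_MAPPING with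
        | some r => some r
        | none =>
          match pvScanA "comicskingdom" (normalize_comic_name comic_name) COMICSKINGDOM_MAPPING with
          | some r => some r
          | none => none) = _
  rw [pvGet_mk_append, ← pvScanA_eq_get, ← pvScanA_eq_get]
  cases h1 : pvScanA "gocomics" (normalize_comic_name comic_name) GOCOMICS_MAPPING <;>
    cases h2 : pvScanA "comicskingdom" (normalize_comic_name comic_name) COMICSKINGDOM_MAPPING <;>
    simp
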